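-- pv_equiv track=rewrite | github.com/NencioniTommaso/SentimentClassification | main.py | apply_negation_tagging
-- ===== SOURCE A (Python) =====
-- import string
--
-- def apply_negation_tagging(text):
--     """
--     Applies negation tagging as per Pang et al. (2002).
--     Assumes punctuation is already space-separated.
--     """
--     negation_words = ['not', 'no', 'never', 'n\'t', 'hardly', 'scarcely', 'barely']
--     punctuation_set = set(string.punctuation)
--     tokens = [t for t in text.split(' ') if t]
--
--     new_tokens = []
--     negation_scope = False
--
--     for token in tokens:
--         token_lower = token.lower()
--
--         # Start negation scope
--         if token_lower in negation_words:
--             negation_scope = True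
--             new_tokens.append(token)
--             continue
--
--         # End negation scope at first punctuation mark
--         if token in punctuation_set:
--             negation_scope = False
--             new_tokens.append(token)
--             continue
--
--         # Apply tag if in scope
--         if negation_scope:
--             new_tokens.append(f'NOT_{token}')
--         else:
--             new_tokens.append(token)
--
--     return ' '.join(new_tokens)
-- ===== SOURCE B (Python) =====
-- import string
--
-- def apply_negation_tagging(text):
--     """Segment-based re-implementation: split the token list on punctuation
--     delimiters, then tag each segment independently after its first negation word."""
--     negation_words = {'not', 'no', 'never', "n't", 'hardly', 'scarcely', 'barely'}
--     punctuation_set = set(string.punctuation)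
--     tokens = [t for t in text.split(' ') if t]
--     out = []
--     i, n = 0, len(tokens)
--     while i < n:
--         if tokens[i] in punctuation_set:
--             out.append(tokens[i])
--             i += 1
--             continue
--         j = i
--         while j < n and tokens[j] not in punctuation_set:
--             j += 1
--         seg = tokens[i:j]
--         k = next((p for p, t in enumerate(seg) if t.lower() in negation_words), len(seg))
--         out.extend(seg[:k + 1])
--         out.extend(t if t.lower() in negation_words else 'NOT_' + t for t in seg[k + 1:])
--         i = j
--     return ' '.join(out)
-- ===== Notes on version B (the rewrite author's own statement) =====
-- stated objective: alternative
-- what changed: Replaces the carried negation-scope boolean flag with an explicit decomposition: the token list is partitioned into segments at punctuation delimiters, each segment is tagged independently after its first negation word, and the pieces are reassembled.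
import Mathlib
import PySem

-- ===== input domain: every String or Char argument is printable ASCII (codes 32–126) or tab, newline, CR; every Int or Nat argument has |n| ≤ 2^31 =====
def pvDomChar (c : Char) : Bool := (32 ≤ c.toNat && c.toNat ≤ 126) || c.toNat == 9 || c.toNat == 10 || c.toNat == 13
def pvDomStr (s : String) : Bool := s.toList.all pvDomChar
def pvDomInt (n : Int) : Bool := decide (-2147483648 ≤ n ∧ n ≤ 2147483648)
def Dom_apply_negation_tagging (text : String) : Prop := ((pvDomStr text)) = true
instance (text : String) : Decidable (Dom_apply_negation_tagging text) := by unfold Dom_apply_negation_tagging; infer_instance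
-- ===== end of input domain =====

-- B re-decomposes A's flag-carrying loop as punctuation-delimited segments tagged independently
-- (objective: alternative, same cost); return values proved equal on all inputs.

-- ===== PORT A =====
def pvNegWords : List String := ["not", "no", "never", "n't", "hardly", "scarcely", "barely"]
def pvPunctList : List String :=
  ["!", "\"", "#", "$", "%", "&", "'", "(", ")", "*", "+", ",", "-", ".", "/", ":",
   ";", "<", "=", ">", "?", "@", "[", "\\", "]", "^", "_", "`", "{", "|", "}", "~"]
-- set(string.punctuation): the 32 single-character punctuation strings
def pvPunctSet : PySem.Set String := PySem.Set.ofList pvPunctList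

def apply_negation_tagging (text : String) : String :=
  let tokens := ((PySem.Str.split? text " ").getD []).filter (fun t => t != "")
  let res := tokens.foldl
    (fun (st : List String × Bool) token =>
      let token_lower := PySem.Str.lower token
      if pvNegWords.contains token_lower then (st.1 ++ [token], true)
      else if PySem.Set.contains pvPunctSet token then (st.1 ++ [token], false)
      else if st.2 then (st.1 ++ ["NOT_" ++ token], st.2)
      else (st.1 ++ [token], st.2))
    ([], false)
  PySem.Str.join " " res.1

-- ===== PORT B =====
def pvIsNeg (t : String) : Bool := pvNegWords.contains (PySem.Str.lower t)
def pvIsPunct (t : String) : Bool := PySem.Set.contains pvPunctSet t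
def pvTag (t : String) : String := if pvIsNeg t then t else "NOT_" ++ t
-- one segment (no punctuation inside): untouched up to and including the first
-- negation word, the rest tagged (negation words stay untagged)
def pvSegOut (seg : List String) : List String :=
  let k := seg.findIdx pvIsNeg
  seg.take (k + 1) ++ (seg.drop (k + 1)).map pvTag
-- the outer while loop of Source B: punctuation tokens are delimiters emitted verbatim,
-- maximal punctuation-free runs are handed to pvSegOut
def pvBGo : List String → List String
  | [] => []
  | t :: ts =>
    if pvIsPunct t then t :: pvBGo ts
    else pvSegOut (t :: ts.takeWhile (fun x => !pvIsPunct x)) ++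
         pvBGo (ts.dropWhile (fun x => !pvIsPunct x))
  termination_by ts => ts.length
  decreasing_by
    · simp
    · simp only [List.length_cons]
      exact Nat.lt_succ_of_le (List.length_dropWhile_le _ _)

def apply_negation_tagging_alt (text : String) : String :=
  let tokens := ((PySem.Str.split? text " ").getD []).filter (fun t => t != "")
  PySem.Str.join " " (pvBGo tokens)

-- ===== PRECONDITION & SPEC =====
def Spec_apply_negation_tagging (text : String) (out : String) : Prop := out = apply_negation_tagging_alt text
instance (text : String) (out : String) : Decidable (Spec_apply_negation_tagging text out) := by unfold Spec_apply_negation_tagging; infer_instance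

-- ===== CLAIM (what is proved, stated in full; the proofs are below) =====
def Claim_equal_apply_negation_tagging : Prop := ∀ (text : String), Dom_apply_negation_tagging text → Spec_apply_negation_tagging text (apply_negation_tagging text)

-- ===== LEMMAS AND PROOFS =====

-- A's loop as forward recursion with the scope flag
def pvAGo : Bool → List String → List String
  | _, [] => []
  | b, t :: ts =>
    if pvIsNeg t then t :: pvAGo true ts
    else if pvIsPunct t then t :: pvAGo false ts
    else if b then ("NOT_" ++ t) :: pvAGo b ts
    else t :: pvAGo b ts

lemma pv_punct_not_neg (t : String) (h : pvIsPunct t = true) : pvIsNeg t = false := by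
  have hm : t ∈ pvPunctList := by
    simpa [pvIsPunct, pvPunctSet, PySem.Set.contains, pvPunctList] using h
  fin_cases hm <;> decide

lemma pv_neg_not_punct (t : String) (h : pvIsNeg t = true) : pvIsPunct t = false := by
  by_contra hc
  have := pv_punct_not_neg t (by simpa using eq_true_of_ne_false hc)
  simp [this] at h

lemma pv_foldl_eq (ts : List String) (acc : List String) (b : Bool) :
    (ts.foldl
      (fun (st : List String × Bool) token =>
        let token_lower := PySem.Str.lower token
        if pvNegWords.contains token_lower then (st.1 ++ [token], true)
        else if PySem.Set.contains pvPunctSet token then (st.1 ++ [token], false)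
        else if st.2 then (st.1 ++ ["NOT_" ++ token], st.2)
        else (st.1 ++ [token], st.2))
      (acc, b)).1 = acc ++ pvAGo b ts := by
  induction ts generalizing acc b with
  | nil => simp [pvAGo]
  | cons t ts ih =>
    rw [List.foldl_cons]
    by_cases hn : pvIsNeg t = true
    · have hn' : pvNegWords.contains (PySem.Str.lower t) = true := hn
      simp only [hn', if_pos]
      rw [ih, pvAGo, if_pos hn]
      simp
    · rw [Bool.not_eq_true] at hn
      have hn' : pvNegWords.contains (PySem.Str.lower t) = false := hn
      by_cases hp : pvIsPunct t = true
      · have hp' : PySem.Set.contains pvPunctSet t = true := hp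
        simp only [hn', hp', Bool.false_eq_true, if_false, if_true]
        rw [ih, pvAGo, if_neg (by simp [hn]), if_pos hp]
        simp
      · rw [Bool.not_eq_true] at hp
        have hp' : PySem.Set.contains pvPunctSet t = false := hp
        cases b with
        | false =>
          simp only [hn', hp', Bool.false_eq_true, if_false]
          rw [ih, pvAGo, if_neg (by simp [hn]), if_neg (by simp [hp]), if_neg (by simp)]
          simp
        | true =>
          simp only [hn', hp', Bool.false_eq_true, if_false, if_true]
          rw [ih, pvAGo, if_neg (by simp [hn]), if_neg (by simp [hp]), if_pos rfl]
          simp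

lemma pv_segOut_nil : pvSegOut [] = [] := by simp [pvSegOut]

lemma pvBGo_nil : pvBGo [] = [] := by rw [pvBGo.eq_def]

lemma pvBGo_cons (t : String) (ts : List String) :
    pvBGo (t :: ts) =
      if pvIsPunct t then t :: pvBGo ts
      else pvSegOut (t :: ts.takeWhile (fun x => !pvIsPunct x)) ++
           pvBGo (ts.dropWhile (fun x => !pvIsPunct x)) := by
  rw [pvBGo.eq_def]

lemma pv_segOut_cons_neg (t : String) (s : List String) (h : pvIsNeg t = true) :
    pvSegOut (t :: s) = t :: s.map pvTag := by
  simp [pvSegOut, List.findIdx_cons, h]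

lemma pv_segOut_cons_not_neg (t : String) (s : List String) (h : pvIsNeg t = false) :
    pvSegOut (t :: s) = t :: pvSegOut s := by
  simp [pvSegOut, List.findIdx_cons, h]

-- reassembly: handing the leading punctuation-free run to pvSegOut and recursing is pvBGo itself
lemma pv_glue (ts : List String) :
    pvSegOut (ts.takeWhile (fun x => !pvIsPunct x)) ++ pvBGo (ts.dropWhile (fun x => !pvIsPunct x))
      = pvBGo ts := by
  cases ts with
  | nil => simp [pvBGo_nil, pv_segOut_nil]
  | cons u r =>
    by_cases hp : pvIsPunct u = true
    · simp [hp, pv_segOut_nil]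
    · simp only [List.takeWhile_cons, List.dropWhile_cons, hp]
      rw [pvBGo_cons]
      simp [hp]

lemma pv_main (ts : List String) :
    pvAGo false ts = pvBGo ts ∧
    pvAGo true ts = (ts.takeWhile (fun x => !pvIsPunct x)).map pvTag ++
      pvBGo (ts.dropWhile (fun x => !pvIsPunct x)) := by
  induction ts with
  | nil => simp [pvAGo, pvBGo_nil]
  | cons t ts ih =>
    obtain ⟨ihF, ihT⟩ := ih
    by_cases hn : pvIsNeg t = true
    · have hp := pv_neg_not_punct t hn
      constructor
      · rw [pvAGo, pvBGo_cons, pv_segOut_cons_neg t _ hn]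
        simp [hn, hp, ihT]
      · rw [pvAGo]
        simp [hn, hp, pvTag, ihT]
    · rw [Bool.not_eq_true] at hn
      by_cases hp : pvIsPunct t = true
      · constructor
        · rw [pvAGo, pvBGo_cons]
          simp [hn, hp, ihF]
        · rw [pvAGo]
          simp [hn, hp, ihF, pvBGo_cons]
      · rw [Bool.not_eq_true] at hp
        constructor
        · rw [pvAGo, pvBGo_cons, pv_segOut_cons_not_neg t _ hn]
          rw [ihF, ← pv_glue ts]
          simp [hn, hp]
        · rw [pvAGo]
          simp [hn, hp, pvTag, ihT]

lemma pv_false_eq (ts : List String) : pvAGo false ts = pvBGo ts := (pv_main ts).1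

-- ===== VERDICT (by name: the statement is the Claim_ definition above) =====
theorem apply_negation_tagging_spec : Claim_equal_apply_negation_tagging := by
  intro text _
  unfold Spec_apply_negation_tagging apply_negation_tagging apply_negation_tagging_alt
  simp only [pv_foldl_eq, List.nil_append, pv_false_eq]
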